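-- pv_equiv track=rewrite | github.com/Nghia03092004/nghia03092004.github.io | project_euler_unified/problem_669/solution.py | find_knight
-- ===== SOURCE A (Python) =====
-- def find_knight(k, m, fib):
--     """Find the m-th knight (1-indexed) in the Hamiltonian path
--     on {1, ..., F_k - 1} of the Fibonacci-sum graph.
--
--     Returns the knight number.
--     """
--     if k <= 2:
--         return m  # base case: {1} or small set
--
--     n_lower = fib[k-2] - 1  # size of lower interval
--     n_upper = fib[k-1]       # size of upper interval (approx)
--
--     # The path interleaves lower and upper sub-paths
--     # This is a simplified model - exact interleaving depends on problem specifics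
--     if m <= n_lower:
--         return find_knight(k - 2, m, fib)
--     else:
--         return fib[k-2] - 1 + find_knight(k - 1, m - n_lower, fib)
-- ===== SOURCE B (Python) =====
-- def find_knight(k, m, fib):
--     """Find the m-th knight (1-indexed) in the Hamiltonian path
--     on {1, ..., F_k - 1} of the Fibonacci-sum graph.
--
--     Iterative descent: thread the post-return addition through an
--     accumulated offset instead of recursing.
--     """
--     offset = 0
--     while k > 2:
--         n_lower = fib[k-2] - 1
--         if m <= n_lower:
--             k -= 2
--         else:
--             offset += n_lower
--             m -= n_lower
--             k -= 1
--     return offset + m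
-- ===== Notes on version B (the rewrite author's own statement) =====
-- stated objective: alternative
-- what changed: Replaces the recursive descent with post-call addition by an explicit while-loop that threads the additive offset through an accumulator, and drops the unused fib[k-1] read.
import Mathlib
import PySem

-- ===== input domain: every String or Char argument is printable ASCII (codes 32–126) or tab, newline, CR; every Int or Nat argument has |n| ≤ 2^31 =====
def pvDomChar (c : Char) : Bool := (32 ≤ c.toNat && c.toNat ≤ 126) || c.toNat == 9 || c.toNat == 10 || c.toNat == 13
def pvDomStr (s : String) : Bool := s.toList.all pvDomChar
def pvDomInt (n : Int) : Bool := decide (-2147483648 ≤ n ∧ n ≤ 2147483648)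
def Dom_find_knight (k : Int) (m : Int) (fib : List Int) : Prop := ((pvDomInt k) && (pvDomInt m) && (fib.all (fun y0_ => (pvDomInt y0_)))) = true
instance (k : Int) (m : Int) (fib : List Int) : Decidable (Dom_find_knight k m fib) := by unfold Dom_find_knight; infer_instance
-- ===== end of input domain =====

-- B replaces A's recursion (with addition after the recursive call) by a while-loop
-- threading an accumulated offset; objective: alternative decomposition, same cost.

-- ===== PORT A =====
def find_knight (k : Int) (m : Int) (fib : List Int) : Int :=
  if k ≤ 2 then m
  else
    match PySem.List.pyGet? fib (k - 2), PySem.List.pyGet? fib (k - 1) with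
    | some a, some _ =>
      let n_lower := a - 1
      if m ≤ n_lower then find_knight (k - 2) m fib
      else a - 1 + find_knight (k - 1) (m - n_lower) fib
    | _, _ => 0   -- IndexError: outside Pre_find_knight
termination_by k.toNat
decreasing_by all_goals omega

-- ===== PORT B =====
def fkLoop (k : Int) (m : Int) (offset : Int) (fib : List Int) : Int :=
  if 2 < k then
    match PySem.List.pyGet? fib (k - 2) with
    | some a =>
      let n_lower := a - 1
      if m ≤ n_lower then fkLoop (k - 2) m offset fib
      else fkLoop (k - 1) (m - n_lower) (offset + n_lower) fib
    | none => 0   -- IndexError: outside Pre_find_knight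
  else offset + m
termination_by k.toNat
decreasing_by all_goals omega

def find_knight_alt (k : Int) (m : Int) (fib : List Int) : Int :=
  fkLoop k m 0 fib

-- ===== PRECONDITION & SPEC =====
-- Pre_: when k > 2, A reads fib[k-2] and fib[k-1]; all later indices are smaller,
-- so A returns normally iff k ≤ 2 or k ≤ len(fib), and raises IndexError otherwise.
def Pre_find_knight (k : Int) (m : Int) (fib : List Int) : Prop :=
  k ≤ 2 ∨ k ≤ (fib.length : Int)
instance (k : Int) (m : Int) (fib : List Int) : Decidable (Pre_find_knight k m fib) := by
  unfold Pre_find_knight; infer_instance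

def pvWitness_find_knight : Int × Int × List Int := (4, 2, [1, 1, 2, 3])


def Spec_find_knight (k : Int) (m : Int) (fib : List Int) (out : Int) : Prop := out = find_knight_alt k m fib
instance (k : Int) (m : Int) (fib : List Int) (out : Int) : Decidable (Spec_find_knight k m fib out) := by unfold Spec_find_knight; infer_instance

-- ===== CLAIM (what is proved, stated in full; the proofs are below) =====
def Claim_equal_find_knight : Prop := ∀ (k : Int) (m : Int) (fib : List Int), Dom_find_knight k m fib → Pre_find_knight k m fib → Spec_find_knight k m fib (find_knight k m fib)

-- ===== LEMMAS AND PROOFS =====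

-- Loop invariant: under Pre_, the accumulator version computes offset + A's value.
theorem fkLoop_eq (k : Int) (m : Int) (offset : Int) (fib : List Int)
    (h : k ≤ 2 ∨ k ≤ (fib.length : Int)) :
    fkLoop k m offset fib = offset + find_knight k m fib := by
  by_cases hk : k ≤ 2
  · unfold fkLoop find_knight
    simp [hk, not_lt.mpr hk]
  · have hlen : k ≤ (fib.length : Int) := by omega
    have h2 : ∃ a, PySem.List.pyGet? fib (k - 2) = some a := by
      cases hg : PySem.List.pyGet? fib (k - 2) with
      | none =>
        rw [PySem.List.pyGet?_eq_none_iff] at hg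
        exact absurd (by simp [PySem.Raise.InRange]; omega) hg
      | some a => exact ⟨a, rfl⟩
    have h1 : ∃ a, PySem.List.pyGet? fib (k - 1) = some a := by
      cases hg : PySem.List.pyGet? fib (k - 1) with
      | none =>
        rw [PySem.List.pyGet?_eq_none_iff] at hg
        exact absurd (by simp [PySem.Raise.InRange]; omega) hg
      | some a => exact ⟨a, rfl⟩
    obtain ⟨a2, h2⟩ := h2
    obtain ⟨a1, h1⟩ := h1
    unfold fkLoop find_knight
    rw [h2, h1]
    have hlt : 2 < k := by omega
    simp only [hk, if_false, hlt, if_true]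
    split_ifs with hm
    · exact fkLoop_eq (k - 2) m offset fib (by omega)
    · rw [fkLoop_eq (k - 1) _ _ fib (by omega)]
      ring
termination_by k.toNat
decreasing_by all_goals omega

-- ===== VERDICT =====
theorem find_knight_spec : Claim_equal_find_knight := by
  intro k m fib _ hpre
  unfold Spec_find_knight find_knight_alt
  rw [fkLoop_eq k m 0 fib hpre]
  ring
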